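-- pv_equiv track=rewrite | github.com/Tronden/DEToolWeb | Web App/Test - Copy/DETool.py | build_header_rows
-- ===== SOURCE A (Python) =====
-- def parse_col_hierarchy(col):
--     return col.split(".")
--
-- def build_header_rows(columns):
--     splitted= [parse_col_hierarchy(c) for c in columns]
--     if not splitted:
--         return [[]]
--     max_depth= max(len(sp) for sp in splitted)
--     # rowHeaders[rIndex][colIndex]
--     rowHeaders= [ [""]*len(columns) for _ in range(max_depth) ]
--     for cIndex, spList in enumerate(splitted):
--         for rIndex, token in enumerate(spList):
--             rowHeaders[rIndex][cIndex]= token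
--     return rowHeaders
-- ===== SOURCE B (Python) =====
-- def build_header_rows(columns):
--     rows = []          # grid grown incrementally, one column at a time
--     seen = 0           # columns consumed so far
--     for c in columns:
--         sp = c.split(".")
--         while len(rows) < len(sp):      # new depth level: pad the columns already placed
--             rows.append([""] * seen)
--         for r, row in enumerate(rows):  # append this column's token (or '') to every row
--             row.append(sp[r] if r < len(sp) else "")
--         seen += 1
--     return rows if rows else [[]]
-- ===== Notes on version B (the rewrite author's own statement) =====
-- stated objective: alternative
-- what changed: B streams over the columns once with an accumulator, growing the grid incrementally (adding new depth rows padded for already-placed columns, then appending each column's token to every row), instead of A's two-phase plan of precomputing max depth, pre-allocating a full matrix of empty strings and scattering tokens into it.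
import Mathlib
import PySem

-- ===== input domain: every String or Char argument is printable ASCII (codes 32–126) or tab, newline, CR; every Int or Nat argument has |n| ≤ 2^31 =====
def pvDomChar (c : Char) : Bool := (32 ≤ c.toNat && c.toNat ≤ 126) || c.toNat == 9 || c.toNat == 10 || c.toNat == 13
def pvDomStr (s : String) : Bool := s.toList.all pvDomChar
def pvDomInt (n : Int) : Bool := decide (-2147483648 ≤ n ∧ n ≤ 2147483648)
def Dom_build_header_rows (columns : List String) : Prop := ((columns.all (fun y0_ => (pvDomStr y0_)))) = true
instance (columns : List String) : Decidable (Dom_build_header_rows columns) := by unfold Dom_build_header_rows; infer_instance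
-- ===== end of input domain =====

-- B builds the grid in one streaming pass over the columns (growing rows, appending one token per row),
-- instead of A's precompute-max-depth / pre-allocate / scatter plan; objective: alternative.

-- ===== PORT A =====
def parse_col_hierarchy (col : String) : List String := (PySem.Str.split? col ".").getD []

def build_header_rows (columns : List String) : List (List String) :=
  let splitted := columns.map (fun c => parse_col_hierarchy c)
  if splitted.isEmpty then [[]] else
  let max_depth := (PySem.List.max? (splitted.map (fun sp => sp.length)) (fun x => x)).getD 0
  let rowHeaders := List.replicate max_depth (List.replicate columns.length "")
  (PySem.List.enumerate splitted 0).foldl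
    (fun grid p =>
      (PySem.List.enumerate p.2 0).foldl
        (fun g q => g.set q.1.toNat ((g.getD q.1.toNat []).set p.1.toNat q.2)) grid)
    rowHeaders

-- ===== PORT B =====
-- streaming build: state = (rows so far, number of columns consumed)
def build_header_rows_alt (columns : List String) : List (List String) :=
  let st := columns.foldl
    (fun (st : List (List String) × Nat) c =>
      let sp := (PySem.Str.split? c ".").getD []
      -- while len(rows) < len(sp): rows.append([""] * seen)
      let rows := st.1 ++ List.replicate (sp.length - st.1.length) (List.replicate st.2 "")
      -- for r, row in enumerate(rows): row.append(sp[r] if r < len(sp) else "")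
      ((PySem.List.enumerate rows 0).map
        (fun q => q.2 ++ [if q.1.toNat < sp.length then sp.getD q.1.toNat "" else ""]),
       st.2 + 1))
    ([], 0)
  if st.1.isEmpty then [[]] else st.1

-- ===== PRECONDITION & SPEC =====
def Spec_build_header_rows (columns : List String) (out : List (List String)) : Prop := out = build_header_rows_alt columns
instance (columns : List String) (out : List (List String)) : Decidable (Spec_build_header_rows columns out) := by unfold Spec_build_header_rows; infer_instance

-- ===== CLAIM (what is proved, stated in full; the proofs are below) =====
def Claim_equal_build_header_rows : Prop := ∀ (columns : List String), Dom_build_header_rows columns → Spec_build_header_rows columns (build_header_rows columns)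

-- ===== LEMMAS AND PROOFS =====

-- common intermediate form both ports are reduced to
def pvSplits (cs : List String) : List (List String) :=
  cs.map (fun c => (PySem.Str.split? c ".").getD [])

def pvGather (sps : List (List String)) (md : Nat) : List (List String) :=
  (List.range md).map (fun r => sps.map (fun sp => if r < sp.length then sp.getD r "" else ""))

def pvMD (sps : List (List String)) : Nat := (sps.map List.length).foldr max 0

lemma pvMD_isMax (sps : List (List String)) (sp : List String) (h : sp ∈ sps) :
    sp.length ≤ pvMD sps := by
  induction sps with
  | nil => cases h
  | cons x t ih =>
    rcases List.mem_cons.mp h with h | h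
    · subst h; simp [pvMD]
    · have := ih h
      simp only [pvMD, List.map_cons, List.foldr_cons]
      exact le_trans this (Nat.le_max_right _ _)

lemma pvGoLen (sep : List Char) (fuel : Nat) (l cur : List Char) (acc : List (List Char)) :
    1 ≤ (PySem.Chars.splitOn.go sep fuel l cur acc).length := by
  induction fuel generalizing l cur acc with
  | zero => simp [PySem.Chars.splitOn.go]
  | succ n ih =>
    cases l with
    | nil => simp [PySem.Chars.splitOn.go]
    | cons c rest =>
      rw [PySem.Chars.splitOn.go]
      split
      · exact ih _ _ _
      · exact ih _ _ _

lemma pvSplitLen (c : String) : 1 ≤ ((PySem.Str.split? c ".").getD []).length := by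
  simp [PySem.Str.split?, PySem.Chars.split?, PySem.Chars.splitOn]
  exact pvGoLen _ _ _ _ _

-- ---- A-side: the scatter loops equal the gather form ----

-- the net effect, on row r, of scattering columns sps at column offset s
def pvOverlay (sps : List (List String)) (s : Nat) (r : Nat) (row : List String) : List String :=
  match sps with
  | [] => row
  | sp :: sps => pvOverlay sps (s+1) r (if r < sp.length then row.set s (sp.getD r "") else row)

lemma pvOverlay_length (sps : List (List String)) (s r : Nat) (row : List String) :
    (pvOverlay sps s r row).length = row.length := by
  induction sps generalizing s row with
  | nil => rfl
  | cons sp sps ih =>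
    simp only [pvOverlay, ih]
    split <;> simp

lemma pvInner_get (c : Nat) (sp : List String) (s : Nat) (g : List (List String)) (r : Nat) :
    ((PySem.List.enumerate sp (s : Int)).foldl
        (fun g q => g.set q.1.toNat ((g.getD q.1.toNat []).set c q.2)) g)[r]? =
      if s ≤ r ∧ r < s + sp.length then g[r]?.map (fun row => row.set c (sp.getD (r - s) ""))
      else g[r]? := by
  induction sp generalizing s g with
  | nil =>
    rw [PySem.List.enumerate_nil, List.foldl_nil,
      if_neg (by simp only [List.length_nil, Nat.add_zero]; omega)]
  | cons x sp ih =>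
    rw [PySem.List.enumerate_cons, List.foldl_cons]
    simp only [List.length_cons]
    have hc : (s : Int) + 1 = ((s + 1 : Nat) : Int) := by push_cast; ring
    rw [hc, ih]
    simp only [Int.toNat_natCast]
    by_cases hr : r = s
    · subst hr
      rw [if_neg (by omega), if_pos (by omega)]
      simp only [Nat.sub_self, List.getD_cons_zero]
      cases hg : g[r]? with
      | none =>
        have hlen : g.length ≤ r := List.getElem?_eq_none_iff.mp hg
        simp [Nat.not_lt.mpr hlen]
      | some row =>
        obtain ⟨hlt, hge⟩ := List.getElem?_eq_some_iff.mp hg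
        have hgd : g.getD r [] = row := by
          rw [List.getD_eq_getElem?_getD, hg]; rfl
        simp [hlt, hge]
    · have hset : (g.set s ((g.getD s []).set c x))[r]? = g[r]? :=
        List.getElem?_set_ne (by omega)
      rw [hset]
      by_cases h2 : s + 1 ≤ r ∧ r < s + 1 + sp.length
      · rw [if_pos h2, if_pos (by omega)]
        have hsub : r - s = (r - (s + 1)) + 1 := by omega
        rw [hsub, List.getD_cons_succ]
      · rw [if_neg h2, if_neg (by omega)]

lemma pvInner_get0 (c : Nat) (sp : List String) (g : List (List String)) (r : Nat) :
    ((PySem.List.enumerate sp 0).foldl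
        (fun g q => g.set q.1.toNat ((g.getD q.1.toNat []).set c q.2)) g)[r]? =
      if r < sp.length then g[r]?.map (fun row => row.set c (sp.getD r ""))
      else g[r]? := by
  have h := pvInner_get c sp 0 g r
  simpa using h

lemma pvOuter_get (sps : List (List String)) (s : Nat) (g : List (List String)) (r : Nat) :
    ((PySem.List.enumerate sps (s : Int)).foldl
        (fun grid p =>
          (PySem.List.enumerate p.2 0).foldl
            (fun g q => g.set q.1.toNat ((g.getD q.1.toNat []).set p.1.toNat q.2)) grid) g)[r]? =
      g[r]?.map (fun row => pvOverlay sps s r row) := by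
  induction sps generalizing s g with
  | nil =>
    rw [PySem.List.enumerate_nil, List.foldl_nil]
    cases g[r]? <;> simp [pvOverlay]
  | cons sp sps ih =>
    rw [PySem.List.enumerate_cons, List.foldl_cons]
    have hc : (s : Int) + 1 = ((s + 1 : Nat) : Int) := by push_cast; ring
    rw [hc, ih]
    simp only [Int.toNat_natCast]
    rw [pvInner_get0]
    simp only [pvOverlay]
    by_cases hr : r < sp.length
    · rw [if_pos hr]
      cases g[r]? <;> simp [hr]
    · rw [if_neg hr]
      cases g[r]? <;> simp [hr]

lemma pvOuter_get0 (sps : List (List String)) (g : List (List String)) (r : Nat) :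
    ((PySem.List.enumerate sps 0).foldl
        (fun grid p =>
          (PySem.List.enumerate p.2 0).foldl
            (fun g q => g.set q.1.toNat ((g.getD q.1.toNat []).set p.1.toNat q.2)) grid) g)[r]? =
      g[r]?.map (fun row => pvOverlay sps 0 r row) := by
  have h := pvOuter_get sps 0 g r
  simpa using h

lemma pvOverlay_get (sps : List (List String)) (s r c : Nat) (row : List String)
    (h : s + sps.length ≤ row.length) :
    (pvOverlay sps s r row)[c]? =
      if s ≤ c ∧ c < s + sps.length then
        (if r < (sps.getD (c - s) []).length then some ((sps.getD (c - s) []).getD r "")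
         else row[c]?)
      else row[c]? := by
  induction sps generalizing s row with
  | nil =>
    simp only [pvOverlay]
    rw [if_neg (by simp only [List.length_nil, Nat.add_zero]; omega)]
  | cons sp sps ih =>
    simp only [pvOverlay, List.length_cons]
    simp only [List.length_cons] at h
    have hlen : (if r < sp.length then row.set s (sp.getD r "") else row).length = row.length := by
      split <;> simp
    rw [ih (s+1) _ (by rw [hlen]; omega)]
    have hs : s < row.length := by omega
    by_cases hcs : c = s
    · subst hcs
      rw [if_neg (show ¬(c + 1 ≤ c ∧ c < c + 1 + sps.length) by omega),
        if_pos (show c ≤ c ∧ c < c + (sps.length + 1) by omega),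
        show c - c = 0 by omega]
      simp only [List.getD_cons_zero]
      by_cases hrr : r < sp.length
      · rw [if_pos hrr, if_pos hrr]
        simp [hs]
      · rw [if_neg hrr, if_neg hrr]
    · have hrow : (if r < sp.length then row.set s (sp.getD r "") else row)[c]? = row[c]? := by
        split
        · exact List.getElem?_set_ne (by omega)
        · rfl
      rw [hrow]
      by_cases h2 : s + 1 ≤ c ∧ c < s + 1 + sps.length
      · rw [if_pos h2, if_pos (show s ≤ c ∧ c < s + (sps.length + 1) by omega),
          show c - s = (c - (s + 1)) + 1 by omega, List.getD_cons_succ]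
      · rw [if_neg h2, if_neg (show ¬(s ≤ c ∧ c < s + (sps.length + 1)) by omega)]

lemma pvRow (splitted : List (List String)) (n : Nat) (hn : splitted.length = n) (r : Nat) :
    pvOverlay splitted 0 r (List.replicate n "") =
      splitted.map (fun sp => if r < sp.length then sp.getD r "" else "") := by
  apply List.ext_getElem?
  intro c
  by_cases hc : c < n
  · have hc' : c < splitted.length := by omega
    rw [pvOverlay_get _ _ _ _ _ (by simp [hn])]
    rw [if_pos ⟨Nat.zero_le _, by omega⟩]
    have hgd : splitted.getD (c - 0) [] = splitted[c] := by
      simp only [Nat.sub_zero]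
      rw [List.getD_eq_getElem?_getD, List.getElem?_eq_getElem hc']
      rfl
    rw [hgd, List.getElem?_map, List.getElem?_eq_getElem hc']
    by_cases hrr : r < splitted[c].length
    · simp [hrr]
    · simp [hrr, hc]
  · have h1 : (pvOverlay splitted 0 r (List.replicate n "")).length ≤ c := by
      rw [pvOverlay_length]; simp; omega
    have h2 : (splitted.map (fun sp => if r < sp.length then sp.getD r "" else "")).length ≤ c := by
      simp [hn]; omega
    rw [List.getElem?_eq_none h1, List.getElem?_eq_none h2]

lemma pvFoldlMax (xs : List Nat) (a : Nat) : xs.foldl max a = max a (xs.foldr max 0) := by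
  induction xs generalizing a with
  | nil => simp
  | cons x t ih =>
    simp only [List.foldl_cons, List.foldr_cons, ih]
    omega

-- A equals the gather form
lemma pvA_gather (columns : List String) (h : columns ≠ []) :
    build_header_rows columns = pvGather (pvSplits columns) (pvMD (pvSplits columns)) := by
  unfold build_header_rows parse_col_hierarchy
  have hempty : (columns.map (fun c => (PySem.Str.split? c ".").getD [])).isEmpty = false := by
    simp [h]
  rw [if_neg (by simp [hempty])]
  have hmd : (PySem.List.max?
      ((columns.map (fun c => (PySem.Str.split? c ".").getD [])).map (fun sp => sp.length))
      (fun x => x)).getD 0 = pvMD (pvSplits columns) := by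
    cases columns with
    | nil => exact absurd rfl h
    | cons c cs =>
      rw [show ((c :: cs).map (fun c => (PySem.Str.split? c ".").getD [])).map
          (fun sp => sp.length) =
          ((PySem.Str.split? c ".").getD []).length ::
            (cs.map (fun c => (PySem.Str.split? c ".").getD [])).map (fun sp => sp.length)
          from by simp]
      rw [PySem.List.max?_id_cons]
      simp only [Option.getD_some, pvMD, pvSplits]
      rw [pvFoldlMax]
      simp
  rw [hmd]
  apply List.ext_getElem?
  intro r
  rw [pvOuter_get0]
  simp only [List.getElem?_replicate, pvGather, List.getElem?_map]
  by_cases hr : r < pvMD (pvSplits columns)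
  · rw [if_pos hr, List.getElem?_range hr]
    simp only [Option.map_some]
    congr 1
    exact pvRow _ _ (by simp) r
  · rw [if_neg hr, List.getElem?_eq_none (by rw [List.length_range]; omega)]
    rfl

-- ---- B-side: the streaming fold maintains the gather form ----

lemma pvGather_length (sps : List (List String)) (md : Nat) :
    (pvGather sps md).length = md := by simp [pvGather]

lemma pvMD_append (sps : List (List String)) (sp : List String) :
    pvMD (sps ++ [sp]) = max (pvMD sps) sp.length := by
  simp only [pvMD, List.map_append, List.foldr_append, List.map_cons, List.map_nil,
    List.foldr_cons, List.foldr_nil]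
  induction sps.map List.length with
  | nil => simp
  | cons x t ih => simp only [List.foldr_cons, ih]; omega

lemma pvStep (sps : List (List String)) (sp : List String) (n : Nat) (hn : sps.length = n) :
    (PySem.List.enumerate
        (pvGather sps (pvMD sps) ++
          List.replicate (sp.length - (pvGather sps (pvMD sps)).length) (List.replicate n "")) 0).map
      (fun q => q.2 ++ [if q.1.toNat < sp.length then sp.getD q.1.toNat "" else ""]) =
      pvGather (sps ++ [sp]) (pvMD (sps ++ [sp])) := by
  set M := pvMD sps with hM
  apply List.ext_getElem?
  intro r
  rw [List.getElem?_map, PySem.List.getElem?_enumerate]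
  rw [pvMD_append]
  simp only [pvGather, List.getElem?_map]
  have hlen1 : ((List.range M).map (fun r => sps.map
      (fun sp => if r < sp.length then sp.getD r "" else ""))).length = M := by simp
  by_cases hr : r < max M sp.length
  · rw [List.getElem?_range hr]
    by_cases hrM : r < M
    · rw [List.getElem?_append_left (by rw [hlen1]; exact hrM)]
      rw [List.getElem?_map, List.getElem?_range hrM]
      simp only [Option.map_some]
      simp
    · rw [List.getElem?_append_right (by rw [hlen1]; omega)]
      rw [hlen1, List.getElem?_replicate, if_pos (by omega)]
      simp only [Option.map_some]
      have hrsp : r < sp.length := by omega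
      have hrep : sps.map (fun sp' => if r < sp'.length then sp'.getD r "" else "") =
          List.replicate n "" := by
        rw [List.eq_replicate_iff]
        refine ⟨by simp [hn], ?_⟩
        intro b hb
        obtain ⟨sp', hsp', hbe⟩ := List.mem_map.mp hb
        have := pvMD_isMax sps sp' hsp'
        rw [← hbe, if_neg (by omega)]
      simp only [List.map_append, List.map_cons, List.map_nil, hrep]
      simp [hrsp]
  · have hA : ((List.range M).map (fun r => sps.map
        (fun sp => if r < sp.length then sp.getD r "" else "")) ++
        List.replicate (sp.length - ((List.range M).map (fun r => sps.map
          (fun sp => if r < sp.length then sp.getD r "" else ""))).length)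
          (List.replicate n "")).length ≤ r := by
      simp only [List.length_append, List.length_map, List.length_range, List.length_replicate]
      omega
    have hB : (List.range (max M sp.length)).length ≤ r := by
      simp only [List.length_range]; omega
    rw [List.getElem?_eq_none hA, List.getElem?_eq_none hB]
    rfl

lemma pvB_inv (cs : List String) :
    cs.foldl
      (fun (st : List (List String) × Nat) c =>
        let sp := (PySem.Str.split? c ".").getD []
        let rows := st.1 ++ List.replicate (sp.length - st.1.length) (List.replicate st.2 "")
        ((PySem.List.enumerate rows 0).map
          (fun q => q.2 ++ [if q.1.toNat < sp.length then sp.getD q.1.toNat "" else ""]),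
         st.2 + 1))
      ([], 0) =
    (pvGather (pvSplits cs) (pvMD (pvSplits cs)), cs.length) := by
  induction cs using List.reverseRecOn with
  | nil => simp [pvSplits, pvMD, pvGather]
  | append_singleton cs c ih =>
    rw [List.foldl_append, ih, List.foldl_cons, List.foldl_nil]
    have hsp : pvSplits (cs ++ [c]) = pvSplits cs ++ [(PySem.Str.split? c ".").getD []] := by
      simp [pvSplits]
    simp only [hsp, List.length_append, List.length_cons, List.length_nil]
    refine Prod.ext ?_ (by simp)
    have := pvStep (pvSplits cs) ((PySem.Str.split? c ".").getD []) cs.length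
      (by simp [pvSplits])
    simpa [pvGather_length] using this

lemma pvB_gather (columns : List String) (h : columns ≠ []) :
    build_header_rows_alt columns = pvGather (pvSplits columns) (pvMD (pvSplits columns)) := by
  unfold build_header_rows_alt
  rw [pvB_inv]
  have hmd : 1 ≤ pvMD (pvSplits columns) := by
    cases columns with
    | nil => exact absurd rfl h
    | cons c cs =>
      have h1 := pvSplitLen c
      have : ((PySem.Str.split? c ".").getD []) ∈ pvSplits (c :: cs) := by
        simp [pvSplits]
      have := pvMD_isMax _ _ this
      omega
  have : (pvGather (pvSplits columns) (pvMD (pvSplits columns))).isEmpty = false := by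
    rw [List.isEmpty_eq_false_iff, ← List.length_pos_iff, pvGather_length]
    omega
  simp only [this]
  rfl

-- ===== VERDICT (by name: the statement is the Claim_ definition above) =====
theorem build_header_rows_spec : Claim_equal_build_header_rows := by
  intro columns _
  unfold Spec_build_header_rows
  by_cases h : columns = []
  · subst h; rfl
  · rw [pvA_gather columns h, pvB_gather columns h]
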